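-- pv_equiv track=rewrite | github.com/laltral14/GlowByte-Autumn-Hack-2023 | task1/glowbyte_transformers.py | check_percentage_condition
-- ===== SOURCE A (Python) =====
-- def check_percentage_condition(string):
--     # Находим все числа в строке
--     numbers = [int(s.strip('%,')) for s in string.split() if s.rstrip('%,').isdigit()]
--
--     # Проверяем, есть ли числа в строке
--     if numbers:
--         # Находим проценты в строке
--         percentages = [num for num in numbers if num >= 0 and num <= 100]
--
--         # Проверяем, есть ли проценты в строке
--         if percentages:
--             # Если есть хотя бы один процент больше 50, возвращаем True
--             if any(percentage > 50 for percentage in percentages):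
--                 return True
--
--     # Если условие не выполняется, возвращаем False
--     return False
-- ===== SOURCE B (Python) =====
-- def check_percentage_condition(string):
--     # Character-level scanner: one pass over the characters, no split() and no
--     # comprehensions.  phase 0 = token start, 1 = in digit run, 2 = in trailing
--     # '%'/',' run, 3 = token cannot be a percentage; buf collects the digit run.
--     phase = 0
--     buf = ''
--     for c in string + ' ':  # sentinel space flushes the final token
--         if c.isspace():
--             if (phase == 1 or phase == 2):
--                 n = int(buf)
--                 if 50 < n <= 100:
--                     return True
--             phase = 0
--             buf = ''
--         elif phase == 3:
--             pass
--         elif c.isdigit():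
--             if phase == 2:
--                 phase = 3
--             else:
--                 phase = 1
--                 buf = buf + c
--         elif c == '%' or c == ',':
--             phase = 2 if (phase == 1 or phase == 2) else 3
--         else:
--             phase = 3
--     return False
-- ===== Notes on version B (the rewrite author's own statement) =====
-- stated objective: alternative
-- what changed: Replaces A's split()-and-three-comprehensions pipeline with a character-level DFA scanner: one pass over the characters tracking a token phase (start / digit run / trailing %-comma run / dead) and a digit buffer, flushing at whitespace and short-circuiting at the first percentage in (50,100].
import Mathlib
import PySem

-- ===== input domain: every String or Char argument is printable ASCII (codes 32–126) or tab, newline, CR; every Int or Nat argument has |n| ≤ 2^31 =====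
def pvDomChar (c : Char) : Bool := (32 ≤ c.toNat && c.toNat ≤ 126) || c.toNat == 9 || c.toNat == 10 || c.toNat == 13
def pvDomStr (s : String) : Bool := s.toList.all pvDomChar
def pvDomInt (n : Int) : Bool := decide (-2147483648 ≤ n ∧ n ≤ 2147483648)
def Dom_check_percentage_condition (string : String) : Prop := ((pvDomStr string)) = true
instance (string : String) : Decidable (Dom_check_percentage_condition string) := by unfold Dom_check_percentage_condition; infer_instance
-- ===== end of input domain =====

-- B replaces A's split()-and-comprehensions pipeline with a character-level DFA scanner
-- (one pass, phase + digit buffer, short-circuiting); objective: alternative.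

-- ===== PORT A =====
-- t.rstrip('%,'): remove trailing characters from {'%', ','} (exact hand port; PySem has no rstrip-with-chars)
def pvRstripPC (t : List Char) : List Char :=
  (t.reverse.dropWhile (fun c => c == '%' || c == ',')).reverse

-- int(t.strip('%,')); the .getD 0 is unreachable where it is used: A calls it only
-- on tokens whose rstrip('%,') core is all digits, so the stripped string parses.
def pvNum (t : List Char) : Int :=
  (PySem.Int.ofChars? (PySem.Chars.stripChars t ['%', ','])).getD 0

def check_percentage_condition (string : String) : Bool :=
  let numbers := ((PySem.Chars.split₀ string.toList).filter
      (fun s => PySem.Chars.strIsdigit (pvRstripPC s))).map pvNum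
  if numbers.isEmpty = false then
    let percentages := numbers.filter (fun num => decide (0 ≤ num) && decide (num ≤ 100))
    if percentages.isEmpty = false then
      if percentages.any (fun percentage => decide (50 < percentage)) then true
      else false
    else false
  else false

-- ===== PORT B =====
-- int(buf); only called when phase ∈ {1,2}, so buf is a nonempty digit run and parses
def pvNumB (buf : List Char) : Int := (PySem.Int.ofChars? buf).getD 0

-- the for-loop of Source B: phase 0 token start, 1 digit run, 2 trailing '%'/',' run, 3 dead token
def pvScanB : List Char → Nat → List Char → Bool
  | [], _, _ => false
  | c :: cs, ph, buf =>
    if PySem.Chars.isspace c then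
      (if (ph == 1 || ph == 2) && (decide (50 < pvNumB buf) && decide (pvNumB buf ≤ 100))
       then true else pvScanB cs 0 [])
    else if ph == 3 then pvScanB cs ph buf
    else if PySem.Chars.isdigit c then
      (if ph == 2 then pvScanB cs 3 buf else pvScanB cs 1 (buf ++ [c]))
    else if c == '%' || c == ',' then
      pvScanB cs (if ph == 1 || ph == 2 then 2 else 3) buf
    else pvScanB cs 3 buf

def check_percentage_condition_alt (string : String) : Bool :=
  pvScanB (string.toList ++ [' ']) 0 []   -- Source B iterates over string + ' ' (sentinel flush)

-- ===== PRECONDITION & SPEC =====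
def Spec_check_percentage_condition (string : String) (out : Bool) : Prop := out = check_percentage_condition_alt string
instance (string : String) (out : Bool) : Decidable (Spec_check_percentage_condition string out) := by unfold Spec_check_percentage_condition; infer_instance

-- ===== CLAIM (what is proved, stated in full; the proofs are below) =====
def Claim_equal_check_percentage_condition : Prop := ∀ (string : String), Dom_check_percentage_condition string → Spec_check_percentage_condition string (check_percentage_condition string)

-- ===== LEMMAS AND PROOFS =====

-- the '%'/',' predicate shared by strip / rstrip / the DFA
def pvPC (c : Char) : Bool := c == '%' || c == ','

-- the per-character transition of B's scanner on a NON-space character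
def pvStep (st : Nat × List Char) (c : Char) : Nat × List Char :=
  if st.1 == 3 then st
  else if PySem.Chars.isdigit c then (if st.1 == 2 then (3, st.2) else (1, st.2 ++ [c]))
  else if c == '%' || c == ',' then ((if st.1 == 1 || st.1 == 2 then 2 else 3), st.2)
  else (3, st.2)

-- the flush test of B's scanner
def pvOk (st : Nat × List Char) : Bool :=
  (st.1 == 1 || st.1 == 2) && (decide (50 < pvNumB st.2) && decide (pvNumB st.2 ≤ 100))

-- B's verdict on one whole token
def pvTokOk (t : List Char) : Bool := pvOk (List.foldl pvStep (0, []) t)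

-- A's verdict on one whole token
def pvAtest (t : List Char) : Bool :=
  PySem.Chars.strIsdigit (pvRstripPC t) && (decide (50 < pvNum t) && decide (pvNum t ≤ 100))

-- "token has the shape digits+ [%,]*"
def pvCondB (t : List Char) : Bool :=
  !(t.takeWhile PySem.Chars.isdigit).isEmpty && (t.dropWhile PySem.Chars.isdigit).all pvPC

theorem pvScanB_nonspace (c : Char) (cs : List Char) (ph : Nat) (buf : List Char)
    (h : PySem.Chars.isspace c = false) :
    pvScanB (c :: cs) ph buf = pvScanB cs (pvStep (ph, buf) c).1 (pvStep (ph, buf) c).2 := by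
  simp only [pvScanB, h, Bool.false_eq_true, if_false]
  unfold pvStep
  split_ifs <;> simp_all

theorem pvScanB_space (c : Char) (cs : List Char) (ph : Nat) (buf : List Char)
    (h : PySem.Chars.isspace c = true) :
    pvScanB (c :: cs) ph buf = (pvOk (ph, buf) || pvScanB cs 0 []) := by
  simp only [pvScanB, h, if_true, pvOk]
  split_ifs with h1 <;> simp_all

theorem pvFoldl_dead (r : List Char) (b : List Char) :
    List.foldl pvStep (3, b) r = (3, b) := by
  induction r with
  | nil => rfl
  | cons c r ih => simpa [pvStep] using ih

theorem pvFoldl_digits (ds : List Char) (b : List Char) (h : ds.all PySem.Chars.isdigit) :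
    List.foldl pvStep (1, b) ds = (1, b ++ ds) := by
  induction ds generalizing b with
  | nil => simp
  | cons c ds ih =>
    simp only [List.all_cons, Bool.and_eq_true] at h
    simp only [List.foldl_cons, pvStep, h.1]
    simpa using ih (b ++ [c]) h.2

theorem pvFoldl_pc (r : List Char) (b : List Char) (h : r.all pvPC) :
    List.foldl pvStep (2, b) r = (2, b) := by
  induction r with
  | nil => rfl
  | cons c r ih =>
    simp only [List.all_cons, Bool.and_eq_true, pvPC] at h
    have hc' : c = '%' ∨ c = ',' := by simpa using h.1
    have hd : PySem.Chars.isdigit c = false := by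
      rcases hc' with h1 | h1 <;> simp [h1, PySem.Chars.isdigit]
    simp only [List.foldl_cons, pvStep, hd, h.1]
    simpa using ih h.2

theorem pvFoldl_pc_bad (r : List Char) (b : List Char) (h : r.all pvPC = false) :
    (List.foldl pvStep (2, b) r).1 = 3 := by
  induction r with
  | nil => simp at h
  | cons c r ih =>
    simp only [List.all_cons, Bool.and_eq_false_iff, pvPC] at h
    by_cases hc : (c == '%' || c == ',') = true
    · have hc' : c = '%' ∨ c = ',' := by simpa using hc
      have hd : PySem.Chars.isdigit c = false := by
        rcases hc' with h1 | h1 <;> simp [h1, PySem.Chars.isdigit]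
      have hr : r.all pvPC = false := by
        rcases h with h | h
        · exact absurd hc (by simp [h])
        · exact h
      simp only [List.foldl_cons, pvStep, hd, hc]
      simpa using ih hr
    · simp only [List.foldl_cons, pvStep, hc]
      by_cases hd : PySem.Chars.isdigit c = true <;>
        simp [hd, pvFoldl_dead]

-- shape characterisation: good tokens (abstract form)
theorem pvFoldl_good_aux (ds rest : List Char) (hne : ds ≠ [])
    (hd : ds.all PySem.Chars.isdigit) (hr : rest.all pvPC) :
    List.foldl pvStep (0, []) (ds ++ rest)
      = ((if rest.isEmpty then 1 else 2 : Nat), ds) := by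
  cases ds with
  | nil => exact absurd rfl hne
  | cons d ds' =>
    simp only [List.all_cons, Bool.and_eq_true] at hd
    have hstep : pvStep (0, ([] : List Char)) d = (1, [d]) := by simp [pvStep, hd.1]
    rw [List.cons_append, List.foldl_cons, hstep, List.foldl_append,
      pvFoldl_digits ds' [d] hd.2]
    simp only [List.singleton_append]
    cases rest with
    | nil => simp
    | cons r0 r' =>
      simp only [List.all_cons, Bool.and_eq_true, pvPC] at hr
      have hc' : r0 = '%' ∨ r0 = ',' := by simpa using hr.1
      have hdig : PySem.Chars.isdigit r0 = false := by
        rcases hc' with h1 | h1 <;> simp [h1, PySem.Chars.isdigit]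
      have hstep2 : pvStep (1, d :: ds') r0 = (2, d :: ds') := by
        simp [pvStep, hdig, hr.1]
      simp only [List.foldl_cons, hstep2, pvFoldl_pc r' (d :: ds') hr.2, List.isEmpty_cons]
      rfl

-- shape characterisation: good tokens
theorem pvFoldl_good (t : List Char) (h : pvCondB t = true) :
    List.foldl pvStep (0, []) t
      = ((if (t.dropWhile PySem.Chars.isdigit).isEmpty then 1 else 2 : Nat),
         t.takeWhile PySem.Chars.isdigit) := by
  unfold pvCondB at h
  simp only [Bool.and_eq_true] at h
  obtain ⟨h1, h2⟩ := h
  conv_lhs => rw [← List.takeWhile_append_dropWhile (p := PySem.Chars.isdigit) (l := t)]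
  exact pvFoldl_good_aux _ _ (by simpa using h1) (List.all_takeWhile ..) h2

-- shape characterisation: bad tokens die in phase 3
theorem pvFoldl_bad (t : List Char) (hne : t ≠ []) (h : pvCondB t = false) :
    (List.foldl pvStep (0, []) t).1 = 3 := by
  unfold pvCondB at h
  by_cases h1 : (t.takeWhile PySem.Chars.isdigit).isEmpty = true
  · -- the first character of t is not a digit: the token dies immediately
    cases t with
    | nil => exact absurd rfl hne
    | cons c t' =>
      have hdig : PySem.Chars.isdigit c = false := by
        by_contra hd
        have hd' : PySem.Chars.isdigit c = true := by
          revert hd; cases PySem.Chars.isdigit c <;> simp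
        simp [hd'] at h1
      have hstep : pvStep (0, ([] : List Char)) c = (3, []) := by
        simp [pvStep, hdig]
      rw [List.foldl_cons, hstep, pvFoldl_dead]
  · -- digits start the token but the tail is not all '%'/',': the token dies later
    have hie : (t.takeWhile PySem.Chars.isdigit).isEmpty = false := by
      revert h1; cases (t.takeWhile PySem.Chars.isdigit).isEmpty <;> simp
    rw [hie] at h
    simp only [Bool.not_false, Bool.true_and] at h
    conv_lhs => rw [← List.takeWhile_append_dropWhile (p := PySem.Chars.isdigit) (l := t)]
    rw [List.foldl_append]
    have hall := List.all_takeWhile (p := PySem.Chars.isdigit) (l := t)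
    cases hds : t.takeWhile PySem.Chars.isdigit with
    | nil => rw [hds] at hie; simp at hie
    | cons d ds' =>
      rw [hds] at hall
      simp only [List.all_cons, Bool.and_eq_true] at hall
      have hfd : List.foldl pvStep (0, []) (d :: ds') = (1, d :: ds') := by
        have hstep : pvStep (0, ([] : List Char)) d = (1, [d]) := by simp [pvStep, hall.1]
        rw [List.foldl_cons, hstep, pvFoldl_digits ds' [d] hall.2]
        rfl
      rw [hfd]
      cases hrest : t.dropWhile PySem.Chars.isdigit with
      | nil => rw [hrest] at h; simp at h
      | cons r0 r' =>
        have hh := List.head?_dropWhile_not PySem.Chars.isdigit t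
        rw [hrest] at hh
        simp only [List.head?_cons] at hh
        rw [hrest] at h
        simp only [List.all_cons, Bool.and_eq_false_iff] at h
        by_cases hc : (r0 == '%' || r0 == ',') = true
        · have hstep2 : pvStep (1, d :: ds') r0 = (2, d :: ds') := by
            simp [pvStep, hh, hc]
          have hr' : r'.all pvPC = false := by
            rcases h with h | h
            · exact absurd hc (by simp [pvPC] at h ⊢; exact h)
            · exact h
          rw [List.foldl_cons, hstep2]
          exact pvFoldl_pc_bad r' (d :: ds') hr'
        · have hc2 : (r0 == '%' || r0 == ',') = false := by
            revert hc; cases (r0 == '%' || r0 == ',') <;> simp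
          have hstep2 : pvStep (1, d :: ds') r0 = (3, d :: ds') := by
            simp [pvStep, hh, hc2]
          rw [List.foldl_cons, hstep2, pvFoldl_dead]

-- a digit character is not '%' or ','
theorem pvDigit_pc_false (c : Char) (h : PySem.Chars.isdigit c = true) : pvPC c = false := by
  simp only [PySem.Chars.isdigit, Bool.and_eq_true, decide_eq_true_eq] at h
  simp only [pvPC, Bool.or_eq_false_iff]
  constructor <;> [skip; skip] <;>
    · rw [beq_eq_false_iff_ne]
      intro hEq
      subst hEq
      revert h
      decide

-- dropping the '%'/',' run from the right of "digits ++ pc-run" leaves the digits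
theorem pvDrop_pc_good (u v : List Char) (hu : u.all PySem.Chars.isdigit = true)
    (hv : v.all pvPC = true) :
    (u ++ v).reverse.dropWhile pvPC = u.reverse := by
  rw [List.reverse_append, List.dropWhile_append]
  have hvr : v.reverse.dropWhile pvPC = [] := by
    rw [List.dropWhile_eq_nil_iff]
    intro x hx
    exact (List.all_eq_true.mp hv) x (List.mem_reverse.mp hx)
  rw [hvr]
  simp only [List.isEmpty_nil, if_true]
  rw [List.dropWhile_eq_self_iff]
  intro hl hp
  have hmem : u.reverse[0] ∈ u := List.mem_reverse.mp (List.getElem_mem hl)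
  rw [pvDigit_pc_false _ ((List.all_eq_true.mp hu) _ hmem)] at hp
  exact absurd hp (by simp)

-- A's digit test on the rstripped token is exactly the shape test
theorem pvStrIsdigit_rstrip (t : List Char) :
    PySem.Chars.strIsdigit (pvRstripPC t) = pvCondB t := by
  have hpc : (fun c : Char => c == '%' || c == ',') = pvPC := by
    funext c; rfl
  by_cases hc : pvCondB t = true
  · -- good shape: rstrip leaves exactly the nonempty digit run
    obtain ⟨h1, h2⟩ : ¬(t.takeWhile PySem.Chars.isdigit).isEmpty = true ∧
        (t.dropWhile PySem.Chars.isdigit).all pvPC = true := by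
      simpa [pvCondB] using hc
    have hds : pvRstripPC t = t.takeWhile PySem.Chars.isdigit := by
      unfold pvRstripPC
      rw [hpc]
      conv_lhs => rw [← List.takeWhile_append_dropWhile (p := PySem.Chars.isdigit) (l := t)]
      rw [pvDrop_pc_good _ _ (List.all_takeWhile ..) h2, List.reverse_reverse]
    rw [hds, hc]
    cases hnil : t.takeWhile PySem.Chars.isdigit with
    | nil => rw [hnil] at h1; simp at h1
    | cons d ds' =>
      have hall := List.all_takeWhile (p := PySem.Chars.isdigit) (l := t)
      rw [hnil] at hall
      simp [PySem.Chars.strIsdigit, hall]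
  · -- bad shape: if strIsdigit of the rstrip held, the shape would be good
    have hc' : pvCondB t = false := by revert hc; cases pvCondB t <;> simp
    rw [hc']
    by_contra hne
    have hsd : PySem.Chars.strIsdigit (pvRstripPC t) = true := by
      revert hne; cases PySem.Chars.strIsdigit (pvRstripPC t) <;> simp
    -- decompose t = u ++ v with u the rstrip core and v the trailing pc-run
    have hdecomp : t = pvRstripPC t ++ (t.reverse.takeWhile pvPC).reverse := by
      unfold pvRstripPC
      rw [hpc]
      rw [← List.reverse_append, List.takeWhile_append_dropWhile, List.reverse_reverse]
    have hvall : (t.reverse.takeWhile pvPC).reverse.all pvPC = true := by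
      rw [List.all_reverse]
      exact List.all_takeWhile ..
    obtain ⟨hune, huall⟩ : ¬(pvRstripPC t).isEmpty = true ∧
        (pvRstripPC t).all PySem.Chars.isdigit = true := by
      simpa [PySem.Chars.strIsdigit] using hsd
    -- compute the shape test on u ++ v
    have hts : t.takeWhile PySem.Chars.isdigit
        = pvRstripPC t ++ (t.reverse.takeWhile pvPC).reverse.takeWhile PySem.Chars.isdigit := by
      conv_lhs => rw [hdecomp]
      rw [List.takeWhile_append]
      rw [List.takeWhile_eq_self_iff.mpr (List.all_eq_true.mp huall)]
      simp
    have htv : (t.reverse.takeWhile pvPC).reverse.takeWhile PySem.Chars.isdigit = [] := by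
      cases hv : (t.reverse.takeWhile pvPC).reverse with
      | nil => rfl
      | cons v0 v' =>
        rw [hv] at hvall
        simp only [List.all_cons, Bool.and_eq_true] at hvall
        have : PySem.Chars.isdigit v0 = false := by
          rcases (by simpa [pvPC] using hvall.1 : v0 = '%' ∨ v0 = ',') with h1 | h1 <;>
            simp [h1, PySem.Chars.isdigit]
        rw [List.takeWhile_cons, this]
        simp
    have hds2 : t.dropWhile PySem.Chars.isdigit = (t.reverse.takeWhile pvPC).reverse := by
      conv_lhs => rw [hdecomp]
      rw [List.dropWhile_append]
      rw [List.dropWhile_eq_nil_iff.mpr (List.all_eq_true.mp huall)]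
      simp only [List.isEmpty_nil, if_true]
      cases hv : (t.reverse.takeWhile pvPC).reverse with
      | nil => rfl
      | cons v0 v' =>
        rw [hv] at hvall
        simp only [List.all_cons, Bool.and_eq_true] at hvall
        have : PySem.Chars.isdigit v0 = false := by
          rcases (by simpa [pvPC] using hvall.1 : v0 = '%' ∨ v0 = ',') with h1 | h1 <;>
            simp [h1, PySem.Chars.isdigit]
        rw [List.dropWhile_cons, this]
        simp
    have : pvCondB t = true := by
      unfold pvCondB
      rw [hts, htv, hds2]
      simp only [List.append_nil, Bool.and_eq_true, Bool.not_eq_eq_eq_not]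
      constructor
      · cases hu : pvRstripPC t with
        | nil => rw [hu] at hune; simp at hune
        | cons _ _ => simp
      · exact hvall
    rw [this] at hc'
    exact absurd hc' (by simp)

-- on good tokens A's strip('%,') leaves exactly the digit run
theorem pvStrip_good (t : List Char) (h : pvCondB t = true) :
    PySem.Chars.stripChars t ['%', ','] = t.takeWhile PySem.Chars.isdigit := by
  obtain ⟨h1, h2⟩ : ¬(t.takeWhile PySem.Chars.isdigit).isEmpty = true ∧
      (t.dropWhile PySem.Chars.isdigit).all pvPC = true := by
    simpa [pvCondB] using h
  have hpc : (fun c : Char => (['%', ','] : List Char).contains c) = pvPC := by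
    funext c
    rcases instDecidableEqChar c '%' with hq | hq <;>
      rcases instDecidableEqChar c ',' with hq2 | hq2 <;>
        simp [pvPC, hq, hq2]
  unfold PySem.Chars.stripChars
  rw [hpc]
  have hleft : t.dropWhile pvPC = t := by
    cases t with
    | nil => rfl
    | cons c t' =>
      have hdigc : PySem.Chars.isdigit c = true := by
        by_contra hd
        have hd' : PySem.Chars.isdigit c = false := by
          revert hd; cases PySem.Chars.isdigit c <;> simp
        rw [List.takeWhile_cons, hd'] at h1
        simp at h1
      simp [pvDigit_pc_false _ hdigc]
  show (List.dropWhile pvPC (List.dropWhile pvPC t).reverse).reverse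
      = t.takeWhile PySem.Chars.isdigit
  rw [hleft]
  conv_lhs => rw [← List.takeWhile_append_dropWhile (p := PySem.Chars.isdigit) (l := t)]
  rw [pvDrop_pc_good _ _ (List.all_takeWhile ..) h2, List.reverse_reverse]

-- the per-token agreement
theorem pvTok_eq (t : List Char) : pvTokOk t = pvAtest t := by
  by_cases hc : pvCondB t = true
  · unfold pvTokOk pvAtest pvNum
    rw [pvFoldl_good t hc, pvStrIsdigit_rstrip, hc, pvStrip_good t hc]
    unfold pvOk pvNumB
    split_ifs <;> simp
  · have hc' : pvCondB t = false := by revert hc; cases pvCondB t <;> simp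
    unfold pvAtest
    rw [pvStrIsdigit_rstrip, hc']
    simp only [Bool.false_and]
    cases t with
    | nil => simp [pvTokOk, pvOk]
    | cons c t' =>
      have h3 := pvFoldl_bad (c :: t') (by simp) hc'
      simp only [pvTokOk, pvOk, h3]
      simp

-- split₀.go's accumulator is a prefix of its result
theorem pvGo_acc (cs : List Char) (cur : List Char) (acc : List (List Char)) :
    PySem.Chars.split₀.go cs cur acc = acc.reverse ++ PySem.Chars.split₀.go cs cur [] := by
  induction cs generalizing cur acc with
  | nil =>
    simp only [PySem.Chars.split₀.go]
    split_ifs <;> simp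
  | cons c cs ih =>
    simp only [PySem.Chars.split₀.go]
    split_ifs with hsp hcur
    · exact ih ..
    · rw [ih [] (cur.reverse :: acc), ih [] [cur.reverse]]
      simp
    · exact ih ..

-- B's scan equals the token-wise any over split₀
theorem pvScan_split (cs : List Char) (p : List Char) :
    pvScanB (cs ++ [' ']) (List.foldl pvStep (0, []) p).1 (List.foldl pvStep (0, []) p).2
      = (PySem.Chars.split₀.go cs p.reverse []).any pvTokOk := by
  induction cs generalizing p with
  | nil =>
    rw [List.nil_append,
      pvScanB_space ' ' [] _ _ (by decide)]
    simp only [PySem.Chars.split₀.go]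
    split_ifs with hcur
    · -- p = []: nothing to flush
      have hp : p = [] := by simpa using hcur
      subst hp
      simp [pvScanB, pvOk]
    · have hp : p ≠ [] := by simpa using hcur
      simp only [List.reverse_reverse]
      show (pvOk (List.foldl pvStep (0, []) p) || pvScanB [] 0 []) = ([].reverse ++ [p]).any pvTokOk
      simp [pvScanB, pvTokOk]
  | cons c cs ih =>
    by_cases hsp : PySem.Chars.isspace c = true
    · rw [List.cons_append, pvScanB_space c _ _ _ hsp]
      simp only [PySem.Chars.split₀.go, hsp, if_true]
      split_ifs with hcur
      · have hp : p = [] := by simpa using hcur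
        subst hp
        have := ih []
        simp only [List.foldl_nil, List.reverse_nil] at this
        rw [← this]
        simp [pvOk]
      · have hp : p ≠ [] := by simpa using hcur
        rw [pvGo_acc cs [] [p.reverse.reverse]]
        simp only [List.reverse_reverse, List.reverse_cons, List.reverse_nil, List.nil_append,
          List.any_append, List.any_cons, List.any_nil]
        have := ih []
        simp only [List.foldl_nil, List.reverse_nil] at this
        rw [this]
        simp [pvTokOk]
    · have hsp' : PySem.Chars.isspace c = false := by
        revert hsp; cases PySem.Chars.isspace c <;> simp
      rw [List.cons_append, pvScanB_nonspace c _ _ _ hsp']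
      have hstep : pvStep (List.foldl pvStep (0, []) p) c = List.foldl pvStep (0, []) (p ++ [c]) := by
        rw [List.foldl_append]
        rfl
      rw [show (List.foldl pvStep (0, []) p).1 = ((List.foldl pvStep (0, []) p).1,
        (List.foldl pvStep (0, []) p).2).1 from rfl] at *
      simp only [PySem.Chars.split₀.go, hsp', Bool.false_eq_true, if_false]
      rw [show (c :: p.reverse) = (p ++ [c]).reverse by simp]
      rw [← ih (p ++ [c]), ← hstep]

-- A's nested ifs equal `any` over the filtered percentages
theorem pvA_if_eq (nums : List Int) :
    (if nums.isEmpty = false then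
      (if (nums.filter (fun num => decide (0 ≤ num) && decide (num ≤ 100))).isEmpty = false then
        (if (nums.filter (fun num => decide (0 ≤ num) && decide (num ≤ 100))).any
              (fun percentage => decide (50 < percentage)) then true else false)
        else false)
      else false)
    = nums.any (fun n => (decide (0 ≤ n) && decide (n ≤ 100)) && decide (50 < n)) := by
  by_cases h : (nums.filter (fun num => decide (0 ≤ num) && decide (num ≤ 100))).any
      (fun percentage => decide (50 < percentage)) = true
  · have hpne : (nums.filter (fun num => decide (0 ≤ num) && decide (num ≤ 100))).isEmpty = false := by
      rcases List.any_eq_true.mp h with ⟨x, hx, _⟩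
      exact List.isEmpty_eq_false_iff.mpr (List.ne_nil_of_mem hx)
    have hnne : nums.isEmpty = false := by
      rcases List.any_eq_true.mp h with ⟨x, hx, _⟩
      exact List.isEmpty_eq_false_iff.mpr (List.ne_nil_of_mem (List.mem_of_mem_filter hx))
    rw [hnne, hpne]
    simp only [if_true, h]
    rw [List.any_filter] at h
    exact h.symm
  · have hfalse := Bool.eq_false_iff.mpr h
    have h' := hfalse
    rw [List.any_filter] at h'
    rw [h']
    simp [hfalse]

-- the two per-token numeric tests agree pointwise
theorem pvQ (n : Int) :
    ((decide (0 ≤ n) && decide (n ≤ 100)) && decide (50 < n))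
      = (decide (50 < n) && decide (n ≤ 100)) := by
  by_cases h : 50 < n
  · by_cases h' : n ≤ 100 <;> simp [h, h', show (0:Int) ≤ n by omega]
  · simp [h]

-- ===== VERDICT (by name: the statement is the Claim_ definition above) =====
theorem check_percentage_condition_spec : Claim_equal_check_percentage_condition := by
  intro s _
  unfold Spec_check_percentage_condition check_percentage_condition check_percentage_condition_alt
  rw [pvA_if_eq, List.any_map, List.any_filter]
  have hA : ∀ t : List Char,
      (PySem.Chars.strIsdigit (pvRstripPC t)
        && ((fun n => (decide (0 ≤ n) && decide (n ≤ 100)) && decide (50 < n)) ∘ pvNum) t) = pvTokOk t := by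
    intro t
    rw [pvTok_eq]
    simp only [Function.comp_apply, pvAtest, pvQ (pvNum t)]
  have := pvScan_split s.toList []
  simp only [List.foldl_nil, List.reverse_nil] at this
  rw [this]
  unfold PySem.Chars.split₀
  exact congrArg (List.any _) (funext hA)
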